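-- pv_equiv track=rewrite | github.com/SophieDurrant/WordFrequencyCount | WordFrequencyCounter.py | getPhrases
-- ===== SOURCE A (Python) =====
-- def getPhrases(word_list, min_words):
--     """Gets a list of phrases in a word list.
--     A phrase is defined as a combination of words in sequential order,
--     of a number of words longer than min_words.
--
--     word_list is a list of words.
--     min_words is an int representing the minimum number of words in a phrase."""
--     phrases = []
--     while len(word_list) >= min_words:
--         phrase = ""
--         for i in range(min_words - 1):
--             phrase = phrase + word_list[i] + " "
--
--         for word in word_list[min_words - 1:]:
--             phrase = phrase + word + " "
--             phrases.append(phrase)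
--         word_list = word_list[1:]
--     return phrases
-- ===== SOURCE B (Python) =====
-- def getPhrases(word_list, min_words):
--     """Gets a list of phrases in a word list.
--     A phrase is defined as a combination of words in sequential order,
--     of a number of words longer than min_words.
--
--     word_list is a list of words.
--     min_words is an int representing the minimum number of words in a phrase."""
--     n = len(word_list)
--     return [' '.join(word_list[i:j]) + ' '
--             for i in range(n - min_words + 1)
--             for j in range(i + min_words, n + 1)]
-- ===== Notes on version B (the rewrite author's own statement) =====
-- stated objective: simpler
-- what changed: A's while-loop over suffixes with an incrementally grown phrase accumulator is replaced by a single index-pair comprehension that recomputes each phrase directly as ' '.join(word_list[i:j]) + ' '; Pre_ excludes min_words <= 0, on which A loops forever (the while condition stays true once word_list is empty).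
import Mathlib
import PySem

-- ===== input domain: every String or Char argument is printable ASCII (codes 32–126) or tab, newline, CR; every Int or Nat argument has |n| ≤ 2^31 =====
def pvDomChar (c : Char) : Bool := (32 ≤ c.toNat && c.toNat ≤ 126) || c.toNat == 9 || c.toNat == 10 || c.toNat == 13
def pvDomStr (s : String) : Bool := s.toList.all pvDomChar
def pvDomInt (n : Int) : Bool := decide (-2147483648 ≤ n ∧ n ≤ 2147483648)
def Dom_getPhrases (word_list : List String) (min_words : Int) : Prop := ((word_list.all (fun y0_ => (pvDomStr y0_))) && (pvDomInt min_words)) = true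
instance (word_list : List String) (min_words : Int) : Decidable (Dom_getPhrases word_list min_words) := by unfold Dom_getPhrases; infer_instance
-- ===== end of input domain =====

-- B replaces A's suffix-by-suffix while loop with a carried phrase accumulator by a flat
-- index-pair comprehension that recomputes each phrase from a slice+join (objective: simpler).


-- ===== PORT A =====
-- A's while loop: one call = one iteration; 'word_list = word_list[1:]' is the structural tail.
-- When word_list = [] and the condition still holds (min_words ≤ 0) Python loops forever;
-- that branch (excluded by Pre_) returns the accumulator so the port stays total.
def getPhrasesLoop (word_list : List String) (min_words : Int) (phrases : List String) : List String :=
  if (word_list.length : Int) ≥ min_words then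
    let phrase : String :=
      (PySem.List.pyRange 0 (min_words - 1) 1).foldl
        (fun p i => p ++ PySem.List.pyGetD word_list i "" ++ " ") ""
    let st :=
      (PySem.List.slice word_list (some (min_words - 1)) none).foldl
        (fun (st : String × List String) word =>
          (st.1 ++ word ++ " ", st.2 ++ [st.1 ++ word ++ " "])) (phrase, phrases)
    match word_list with
    | [] => st.2
    | _ :: t => getPhrasesLoop t min_words st.2
  else phrases

def getPhrases (word_list : List String) (min_words : Int) : List String :=
  getPhrasesLoop word_list min_words []

-- ===== PORT B =====
def getPhrases_alt (word_list : List String) (min_words : Int) : List String :=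
  let n : Int := word_list.length
  ((PySem.List.pyRange 0 (n - min_words + 1) 1).map (fun i =>
    (PySem.List.pyRange (i + min_words) (n + 1) 1).map (fun j =>
      PySem.Str.join " " (PySem.List.slice word_list (some i) (some j)) ++ " "))).flatten

-- ===== PRECONDITION & SPEC =====
-- Pre_ excludes min_words ≤ 0: there the Python A never returns (the while condition
-- 'len(word_list) >= min_words' remains true once word_list is empty, so A loops forever).
def Pre_getPhrases (word_list : List String) (min_words : Int) : Prop := 1 ≤ min_words
instance (word_list : List String) (min_words : Int) : Decidable (Pre_getPhrases word_list min_words) := by unfold Pre_getPhrases; infer_instance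
def pvWitness_getPhrases : List String × Int := (["the", "quick", "fox"], 2)

def Spec_getPhrases (word_list : List String) (min_words : Int) (out : List String) : Prop := out = getPhrases_alt word_list min_words
instance (word_list : List String) (min_words : Int) (out : List String) : Decidable (Spec_getPhrases word_list min_words out) := by unfold Spec_getPhrases; infer_instance

-- ===== CLAIM (what is proved, stated in full; the proofs are below) =====
def Claim_equal_getPhrases : Prop := ∀ (word_list : List String) (min_words : Int), Dom_getPhrases word_list min_words → Pre_getPhrases word_list min_words → Spec_getPhrases word_list min_words (getPhrases word_list min_words)

-- ===== LEMMAS AND PROOFS =====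

-- A's phrase accumulator: foldl (· ++ w ++ " ") "".
def concatSp (ws : List String) : String := ws.foldl (fun p w => p ++ w ++ " ") ""

-- Phrases emitted by one iteration of A's while loop on suffix s (m = min_words as a Nat).
def rowSpec (s : List String) (m : Nat) : List String :=
  (List.range (s.length + 1 - m)).map (fun k => concatSp (s.take (m + k)))

-- All phrases: one row per suffix.
def phSpec (wl : List String) (m : Nat) : List String :=
  ((List.range (wl.length + 1 - m)).map (fun i => rowSpec (wl.drop i) m)).flatten

theorem foldl_concat_start (ws : List String) (p : String) :
    ws.foldl (fun p w => p ++ w ++ " ") p = p ++ concatSp ws := by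
  induction ws generalizing p with
  | nil => exact String.toList_inj.mp (by simp [concatSp])
  | cons w t ih =>
    simp only [concatSp, List.foldl_cons] at *
    rw [ih, ih ("" ++ w ++ " ")]
    exact String.toList_inj.mp (by simp)

theorem concatSp_append (xs ys : List String) :
    concatSp (xs ++ ys) = concatSp xs ++ concatSp ys := by
  simp only [concatSp, List.foldl_append]
  rw [foldl_concat_start]; rfl

theorem join_concatSp (ws : List String) (h : ws ≠ []) :
    PySem.Str.join " " ws ++ " " = concatSp ws := by
  induction ws with
  | nil => simp at h
  | cons w t ih =>
    cases t with
    | nil =>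
      apply String.toList_inj.mp
      simp [PySem.Str.join, PySem.Chars.join_singleton, concatSp]
    | cons w2 t2 =>
      have ih' := ih (by simp)
      have : concatSp (w :: w2 :: t2) = concatSp [w] ++ concatSp (w2 :: t2) :=
        concatSp_append [w] (w2 :: t2)
      rw [this, ← ih']
      apply String.toList_inj.mp
      simp [PySem.Str.join, PySem.Chars.join_cons_cons, concatSp]

theorem pair_foldl_snd (ws : List String) (p : String) (acc : List String) :
    (ws.foldl (fun (st : String × List String) word =>
        (st.1 ++ word ++ " ", st.2 ++ [st.1 ++ word ++ " "])) (p, acc)).2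
      = acc ++ (List.range ws.length).map (fun k => p ++ concatSp (ws.take (k + 1))) := by
  induction ws generalizing p acc with
  | nil => simp
  | cons w t ih =>
    rw [List.foldl_cons, ih]
    simp only [List.length_cons, List.range_succ_eq_map, List.map_cons, List.map_map]
    have h0 : p ++ concatSp ((w :: t).take (0 + 1)) = p ++ w ++ " " :=
      String.toList_inj.mp (by simp [concatSp])
    have h1 : ∀ k : Nat, p ++ concatSp ((w :: t).take (k + 1 + 1))
        = p ++ w ++ " " ++ concatSp (t.take (k + 1)) := by
      intro k
      have : (w :: t).take (k + 2) = [w] ++ t.take (k + 1) := by simp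
      rw [this, concatSp_append]
      exact String.toList_inj.mp (by simp [concatSp])
    simp only [Function.comp_def, Nat.succ_eq_add_one, h0, h1]
    simp

theorem prefix_foldl (wl : List String) (r : Nat) (hr : r ≤ wl.length) :
    (List.range r).foldl (fun p k => p ++ wl.getD k "" ++ " ") "" = concatSp (wl.take r) := by
  induction r with
  | zero => simp [concatSp]
  | succ r ih =>
    rw [List.range_succ, List.foldl_append, ih (by omega)]
    rw [List.take_add_one, concatSp_append]
    have : wl[r]? = some wl[r] := List.getElem?_eq_getElem (by omega)
    simp only [List.foldl_cons, List.foldl_nil, this, Option.toList_some]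
    have : wl.getD r "" = wl[r] := by rw [List.getD_eq_getElem?_getD, this]; rfl
    rw [this]
    exact String.toList_inj.mp (by simp [concatSp])

theorem iter_row (wl : List String) (mw : Int) (hm : 1 ≤ mw) (hlen : mw ≤ (wl.length : Int))
    (acc : List String) :
    ((PySem.List.slice wl (some (mw - 1)) none).foldl
        (fun (st : String × List String) word =>
          (st.1 ++ word ++ " ", st.2 ++ [st.1 ++ word ++ " "]))
        ((PySem.List.pyRange 0 (mw - 1) 1).foldl
          (fun p i => p ++ PySem.List.pyGetD wl i "" ++ " ") "", acc)).2
      = acc ++ rowSpec wl mw.toNat := by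
  have hm1 : (mw - 1).toNat = mw.toNat - 1 := by omega
  have hphrase : (PySem.List.pyRange 0 (mw - 1) 1).foldl
      (fun p i => p ++ PySem.List.pyGetD wl i "" ++ " ") ""
      = concatSp (wl.take (mw.toNat - 1)) := by
    rw [PySem.List.pyRange_one, List.foldl_map]
    have : ∀ (p : String), ∀ k ∈ List.range (mw - 1 - 0).toNat,
        p ++ PySem.List.pyGetD wl (0 + (k : Int)) "" ++ " " = p ++ wl.getD k "" ++ " " := by
      intro p k _
      rw [zero_add, PySem.List.pyGetD_natCast]
    rw [PySem.List.foldl_congr_mem _ _ _ _ this]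
    have : (mw - 1 - 0).toNat = mw.toNat - 1 := by omega
    rw [this, prefix_foldl wl (mw.toNat - 1) (by omega)]
  rw [hphrase, PySem.List.slice_from wl (by omega), hm1, pair_foldl_snd]
  congr 1
  rw [rowSpec, List.length_drop]
  have hcnt : wl.length - (mw.toNat - 1) = wl.length + 1 - mw.toNat := by omega
  rw [hcnt]
  apply List.map_congr_left
  intro k _
  rw [← concatSp_append, ← List.take_add]
  congr 2
  omega

theorem phSpec_nil (m : Nat) (hm : 1 ≤ m) : phSpec [] m = [] := by
  have : 0 + 1 - m = 0 := by omega
  simp [phSpec, this]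

theorem phSpec_cons (w : String) (t : List String) (m : Nat)
    (h : m ≤ t.length + 1) :
    phSpec (w :: t) m = rowSpec (w :: t) m ++ phSpec t m := by
  rw [phSpec, List.length_cons]
  have : t.length + 1 + 1 - m = (t.length + 1 - m) + 1 := by omega
  rw [this, List.range_succ_eq_map, List.map_cons, List.map_map, List.flatten_cons,
    List.drop_zero]
  congr 1

theorem phSpec_short (wl : List String) (m : Nat) (h : wl.length + 1 ≤ m) : phSpec wl m = [] := by
  have : wl.length + 1 - m = 0 := by omega
  simp [phSpec, this]

theorem loop_spec (mw : Int) (hm : 1 ≤ mw) (wl : List String) (acc : List String) :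
    getPhrasesLoop wl mw acc = acc ++ phSpec wl mw.toNat := by
  induction wl generalizing acc with
  | nil =>
    rw [getPhrasesLoop, if_neg (by simp; omega), phSpec_nil mw.toNat (by omega), List.append_nil]
  | cons w t ih =>
    rw [getPhrasesLoop]
    by_cases hc : (((w :: t).length : Int) ≥ mw)
    · rw [if_pos hc]
      simp only
      rw [iter_row (w :: t) mw hm (by omega) acc, ih, List.append_assoc]
      rw [phSpec_cons w t mw.toNat (by simp at hc; omega)]
    · rw [if_neg hc]
      have hlt : ((w :: t).length : Int) < mw := lt_of_not_ge hc
      simp only [List.length_cons] at hlt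
      rw [phSpec_short (w :: t) mw.toNat (by omega), List.append_nil]

theorem alt_spec (wl : List String) (mw : Int) (hm : 1 ≤ mw) :
    getPhrases_alt wl mw = phSpec wl mw.toNat := by
  rw [getPhrases_alt, phSpec]
  rw [PySem.List.pyRange_one, List.map_map]
  have hc : ((wl.length : Int) - mw + 1 - 0).toNat = wl.length + 1 - mw.toNat := by omega
  rw [hc]
  refine congrArg List.flatten ?_
  apply List.map_congr_left
  intro k hk
  rw [List.mem_range] at hk
  have hkm : k + mw.toNat ≤ wl.length := by omega
  simp only [Function.comp_def, zero_add]
  rw [PySem.List.pyRange_one, List.map_map, rowSpec]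
  have hc2 : ((wl.length : Int) + 1 - ((k : Int) + mw)).toNat
      = (wl.drop k).length + 1 - mw.toNat := by
    rw [List.length_drop]; omega
  rw [hc2]
  apply List.map_congr_left
  intro j hj
  rw [List.mem_range, List.length_drop] at hj
  simp only [Function.comp_def]
  have hb : (0 : Int) ≤ (k : Int) + mw + (j : Int) := by omega
  rw [PySem.List.slice_toNat wl (by omega) hb]
  have h1 : ((k : Int) + mw + (j : Int)).toNat - ((k : Int)).toNat = mw.toNat + j := by omega
  have h2 : ((k : Int)).toNat = k := by omega
  rw [h1, h2]
  apply join_concatSp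
  apply List.ne_nil_of_length_pos
  rw [List.length_take, List.length_drop]
  omega

-- ===== VERDICT (by name: the statement is the Claim_ definition above) =====
theorem getPhrases_spec : Claim_equal_getPhrases := by
  intro wl mw _ hpre
  unfold Spec_getPhrases
  rw [getPhrases, loop_spec mw hpre wl [], alt_spec wl mw hpre, List.nil_append]
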